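-- pv_equiv track=rewrite | github.com/BrettRey/erdos-problem-993 | scripts/leaf_covariance_scan.py | encode_graph6_small
-- ===== SOURCE A (Python) =====
-- def encode_graph6_small(adj: list[list[int]]) -> str:
--     n = len(adj)
--     if n >= 63:
--         return "<n>=63"
--     aset = [set(nei) for nei in adj]
--     bits: list[int] = []
--     for j in range(1, n):
--         sj = aset[j]
--         for i in range(j):
--             bits.append(1 if i in sj else 0)
--     while len(bits) % 6:
--         bits.append(0)
--     out = [chr(n + 63)]
--     for t in range(0, len(bits), 6):
--         v = 0
--         for b in bits[t : t + 6]: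
--             v = (v << 1) | b
--         out.append(chr(v + 63))
--     return "".join(out)
-- ===== SOURCE B (Python) =====
-- def encode_graph6_small(adj: list[list[int]]) -> str:
--     n = len(adj)
--     if n >= 63:
--         return "<n>=63"
--     out = [chr(n + 63)]
--     cur = 0
--     cnt = 0
--     for j in range(1, n):
--         row = adj[j]
--         for i in range(j):
--             cur = (cur << 1) | (1 if i in row else 0)
--             cnt += 1
--             if cnt == 6:
--                 out.append(chr(cur + 63))
--                 cur = 0
--                 cnt = 0
--     if cnt:
--         out.append(chr((cur << (6 - cnt)) + 63))
--     return "".join(out)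
-- ===== Notes on version B (the rewrite author's own statement) =====
-- stated objective: simpler
-- what changed: B drops the intermediate bits list, the explicit zero-padding loop and the slice-based packing pass, streaming each membership bit into a running 6-bit accumulator and flushing a character whenever 6 bits are collected, padding the leftover by one left-shift.
import Mathlib
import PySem

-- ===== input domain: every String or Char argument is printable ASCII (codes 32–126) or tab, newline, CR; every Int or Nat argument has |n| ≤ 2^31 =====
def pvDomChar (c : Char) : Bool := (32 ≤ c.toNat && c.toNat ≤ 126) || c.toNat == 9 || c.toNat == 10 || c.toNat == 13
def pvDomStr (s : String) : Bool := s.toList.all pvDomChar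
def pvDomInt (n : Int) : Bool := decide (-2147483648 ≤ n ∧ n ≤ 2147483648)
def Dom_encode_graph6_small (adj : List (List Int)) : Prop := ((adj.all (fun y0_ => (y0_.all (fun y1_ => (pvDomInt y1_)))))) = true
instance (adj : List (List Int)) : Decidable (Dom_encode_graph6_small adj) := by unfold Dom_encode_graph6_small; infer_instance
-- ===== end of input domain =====

-- B replaces A's bits-list + padding loop + slice packing pass by one streaming pass with a
-- 6-bit accumulator; same return value everywhere (proved below), no speed claim.

-- ===== PORT A =====

-- `while len(bits) % 6: bits.append(0)` — the loop body runs at most 5 times, so fuel 6 is exact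
def pvPadWhile : Nat → List Int → List Int
  | 0, bits => bits
  | f + 1, bits => if bits.length % 6 ≠ 0 then pvPadWhile f (bits ++ [0]) else bits

def encode_graph6_small (adj : List (List Int)) : String :=
  let n : Int := adj.length
  if n ≥ 63 then "<n>=63"
  else
    let aset := adj.map (fun nei => PySem.Set.ofList nei)
    let bits : List Int :=
      (PySem.List.pyRange 1 n 1).foldl (fun bits j =>
        let sj := PySem.List.pyGetD aset j PySem.Set.empty
        (PySem.List.pyRange 0 j 1).foldl (fun bits i =>
          bits ++ [if PySem.Set.contains sj i then (1 : Int) else 0]) bits) []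
    let bits := pvPadWhile 6 bits
    let out : List Char := [Char.ofNat (n + 63).toNat]
    let out :=
      (PySem.List.pyRange 0 (bits.length : Int) 6).foldl (fun out t =>
        -- (v << 1) | b = 2*v + b exactly: v ≥ 0 and b ∈ {0,1}
        let v := (PySem.List.slice bits (some t) (some (t + 6))).foldl (fun v b => 2 * v + b) 0
        out ++ [Char.ofNat (v + 63).toNat]) out
    String.mk out

-- ===== PORT B =====
def encode_graph6_small_alt (adj : List (List Int)) : String :=
  let n : Int := adj.length
  if n ≥ 63 then "<n>=63"
  else
    let st : List Char × Int × Int :=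
      (PySem.List.pyRange 1 n 1).foldl (fun st j =>
        let row := PySem.List.pyGetD adj j []
        (PySem.List.pyRange 0 j 1).foldl (fun st i =>
          -- (cur << 1) | bit = 2*cur + bit exactly: cur ≥ 0 and bit ∈ {0,1}
          let cur := 2 * st.2.1 + (if row.contains i then (1 : Int) else 0)
          let cnt := st.2.2 + 1
          if cnt = 6 then (st.1 ++ [Char.ofNat (cur + 63).toNat], (0 : Int), (0 : Int))
          else (st.1, cur, cnt)) st)
        ([Char.ofNat (n + 63).toNat], (0 : Int), (0 : Int))
    -- cur << (6 - cnt) = cur * 2^(6-cnt) exactly: cur ≥ 0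
    let out := if st.2.2 ≠ 0 then st.1 ++ [Char.ofNat (st.2.1 * 2 ^ (6 - st.2.2).toNat + 63).toNat] else st.1
    String.mk out

-- ===== PRECONDITION & SPEC =====
def Spec_encode_graph6_small (adj : List (List Int)) (out : String) : Prop := out = encode_graph6_small_alt adj
instance (adj : List (List Int)) (out : String) : Decidable (Spec_encode_graph6_small adj out) := by unfold Spec_encode_graph6_small; infer_instance

-- ===== CLAIM (what is proved, stated in full; the proofs are below) =====
def Claim_equal_encode_graph6_small : Prop := ∀ (adj : List (List Int)), Dom_encode_graph6_small adj → Spec_encode_graph6_small adj (encode_graph6_small adj)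

-- ===== LEMMAS AND PROOFS =====

def pvPack (l : List Int) : Int := l.foldl (fun v b => 2 * v + b) 0

def pvChunks : List Int → List Char
  | [] => []
  | b :: bs =>
      Char.ofNat (pvPack ((b :: bs).take 6) + 63).toNat :: pvChunks ((b :: bs).drop 6)
termination_by l => l.length
decreasing_by simp [List.length_drop]

def pvStep (st : List Char × Int × Int) (b : Int) : List Char × Int × Int :=
  let cur := 2 * st.2.1 + b
  let cnt := st.2.2 + 1
  if cnt = 6 then (st.1 ++ [Char.ofNat (cur + 63).toNat], (0 : Int), (0 : Int))
  else (st.1, cur, cnt)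

def pvFlush (st : List Char × Int × Int) : List Char :=
  if st.2.2 ≠ 0 then st.1 ++ [Char.ofNat (st.2.1 * 2 ^ (6 - st.2.2).toNat + 63).toNat] else st.1

def pvBits (adj : List (List Int)) : List Int :=
  (PySem.List.pyRange 1 (adj.length : Int) 1).flatMap (fun j =>
    (PySem.List.pyRange 0 j 1).map (fun i =>
      if (PySem.List.pyGetD adj j []).contains i then (1 : Int) else 0))

lemma pvChunks_nil : pvChunks [] = [] := by unfold pvChunks; rfl

lemma pvPack_snoc (l : List Int) (b : Int) : pvPack (l ++ [b]) = 2 * pvPack l + b := by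
  simp [pvPack]

lemma pvPack_append_zeros (l : List Int) (k : Nat) :
    pvPack (l ++ List.replicate k 0) = pvPack l * 2 ^ k := by
  induction k generalizing l with
  | zero => simp
  | succ k ih =>
      have : l ++ List.replicate (k + 1) 0 = (l ++ [0]) ++ List.replicate k 0 := by
        simp [List.replicate_succ, List.append_assoc]
      rw [this, ih, pvPack_snoc]; ring

lemma pvPadWhile_closed (l : List Int) :
    pvPadWhile 6 l = l ++ List.replicate ((6 - l.length % 6) % 6) 0 := by
  have h : l.length % 6 = 0 ∨ l.length % 6 = 1 ∨ l.length % 6 = 2 ∨ l.length % 6 = 3 ∨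
      l.length % 6 = 4 ∨ l.length % 6 = 5 := by omega
  rcases h with h | h | h | h | h | h <;>
    simp [pvPadWhile, h, Nat.add_mod, List.replicate_succ', List.append_assoc]

lemma pvChunks_cons6 (c rest : List Int) (hc : c.length = 6) :
    pvChunks (c ++ rest) = Char.ofNat (pvPack c + 63).toNat :: pvChunks rest := by
  have h1 : (c ++ rest).take 6 = c := List.take_left' hc
  have h2 : (c ++ rest).drop 6 = rest := List.drop_left' hc
  rw [pvChunks.eq_def]
  split
  · next heq =>
      exfalso
      have := congrArg List.length heq
      simp [hc] at this
  · next b bs heq =>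
      rw [← heq, h1, h2]

lemma pvStream (bits : List Int) : ∀ (pend : List Int) (out : List Char), pend.length < 6 →
    pvFlush (bits.foldl pvStep (out, pvPack pend, (pend.length : Int)))
      = out ++ pvChunks (pvPadWhile 6 (pend ++ bits)) := by
  induction bits with
  | nil =>
      intro pend out hlt
      by_cases hne : pend = []
      · subst hne
        simp [pvFlush, pvPadWhile, pvPack, pvChunks_nil]
      · have hpos : 0 < pend.length := List.length_pos_iff.mpr hne
        simp only [List.foldl_nil, List.append_nil, pvFlush]
        rw [if_pos (by simp; omega), pvPadWhile_closed]
        have hmod : pend.length % 6 = pend.length := Nat.mod_eq_of_lt hlt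
        have hck : (pend ++ List.replicate ((6 - pend.length % 6) % 6) 0).length = 6 := by
          simp [List.length_append]; omega
        rw [show pend ++ List.replicate ((6 - pend.length % 6) % 6) 0
              = (pend ++ List.replicate ((6 - pend.length % 6) % 6) 0) ++ [] by simp,
            pvChunks_cons6 _ _ hck]
        rw [pvPack_append_zeros]
        have he : ((6 : Int) - (pend.length : Int)).toNat = (6 - pend.length % 6) % 6 := by omega
        simp [pvChunks_nil, he]
  | cons b bs ih =>
      intro pend out hlt
      simp only [List.foldl_cons]
      have hp0 : pvPack ([] : List Int) = 0 := rfl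
      by_cases h6 : pend.length = 5
      · have hstep : pvStep (out, pvPack pend, (pend.length : Int)) b
            = (out ++ [Char.ofNat (pvPack (pend ++ [b]) + 63).toNat], (0 : Int), (0 : Int)) := by
          simp [pvStep, h6, pvPack_snoc]
        rw [hstep]
        have hih := ih [] (out ++ [Char.ofNat (pvPack (pend ++ [b]) + 63).toNat]) (by simp)
        simp only [hp0, List.length_nil, Int.natCast_zero, List.nil_append] at hih
        rw [hih]
        have hlen : (pend ++ [b]).length = 6 := by simp [h6]
        rw [show pend ++ b :: bs = (pend ++ [b]) ++ bs by simp,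
            pvPadWhile_closed ((pend ++ [b]) ++ bs), pvPadWhile_closed bs]
        have hmod : ((pend ++ [b]) ++ bs).length % 6 = bs.length % 6 := by
          simp [List.length_append]; omega
        rw [hmod, List.append_assoc (pend ++ [b]) bs
            (List.replicate ((6 - bs.length % 6) % 6) 0), pvChunks_cons6 _ _ hlen]
        simp
      · have hcnt : ((pend.length : Int) + 1) ≠ 6 := by omega
        have hstep : pvStep (out, pvPack pend, (pend.length : Int)) b
            = (out, pvPack (pend ++ [b]), ((pend ++ [b]).length : Int)) := by
          simp only [pvStep]
          rw [if_neg hcnt]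
          simp [pvPack_snoc]
        rw [hstep]
        rw [ih (pend ++ [b]) out (by simp; omega)]
        simp [List.append_assoc]

lemma pvFoldl_flatMap {α β γ : Type} (f : γ → β → γ) (g : α → List β) (l : List α) (init : γ) :
    (l.flatMap g).foldl f init = l.foldl (fun s j => (g j).foldl f s) init := by
  induction l generalizing init with
  | nil => simp
  | cons a l ih => simp [List.flatMap_cons, List.foldl_append, ih]

lemma pvFoldl_append_singleton {α β : Type} (f : α → β) (l : List α) (acc : List β) :
    l.foldl (fun acc x => acc ++ [f x]) acc = acc ++ l.map f := by
  induction l generalizing acc with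
  | nil => simp
  | cons a l ih => simp [ih]

lemma pvContains_ofList (l : List Int) (i : Int) :
    PySem.Set.contains (PySem.Set.ofList l) i = l.contains i := by
  rw [Bool.eq_iff_iff]
  simp only [PySem.Set.contains, List.contains_iff_mem]
  exact PySem.Set.mem_ofList l i

lemma pvGetD_ofList (adj : List (List Int)) (j : Int) :
    PySem.List.pyGetD (adj.map (fun nei => PySem.Set.ofList nei)) j PySem.Set.empty
      = PySem.Set.ofList (PySem.List.pyGetD adj j []) := by
  have := PySem.List.pyGetD_map (f := fun nei : List Int => PySem.Set.ofList nei) (xs := adj)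
    (i := j) (d := ([] : List Int))
  simpa [PySem.Set.ofList, PySem.Set.empty] using this

-- A's bit-building nested loop produces exactly pvBits
lemma pvBitsA (adj : List (List Int)) :
    (PySem.List.pyRange 1 (adj.length : Int) 1).foldl (fun bits j =>
      (PySem.List.pyRange 0 j 1).foldl (fun bits i =>
        bits ++ [if PySem.Set.contains (PySem.List.pyGetD (adj.map (fun nei => PySem.Set.ofList nei)) j PySem.Set.empty) i then (1 : Int) else 0]) bits) []
    = pvBits adj := by
  have hfun : (fun (bits : List Int) (j : Int) =>
      (PySem.List.pyRange 0 j 1).foldl (fun bits i =>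
        bits ++ [if PySem.Set.contains (PySem.List.pyGetD (adj.map (fun nei => PySem.Set.ofList nei)) j PySem.Set.empty) i then (1 : Int) else 0]) bits)
      = fun bits j => bits ++ (PySem.List.pyRange 0 j 1).map (fun i =>
          if (PySem.List.pyGetD adj j []).contains i then (1 : Int) else 0) := by
    funext bits j
    rw [pvFoldl_append_singleton]
    simp only [pvGetD_ofList, pvContains_ofList]
  rw [hfun, PySem.List.foldl_append_eq_flatMap]
  simp [pvBits]

-- A's packing pass over a bit list of length 6*m is pvChunks
lemma pvSlice6 (l : List Int) (k : Nat) :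
    PySem.List.slice l (some ((6 * k : Nat) : Int)) (some (((6 * k : Nat) : Int) + 6))
      = (l.drop (6 * k)).take 6 := by
  have he : (((6 * k : Nat) : Int) + 6) = ((6 * k + 6 : Nat) : Int) := by push_cast; ring
  rw [he, PySem.List.slice_natCast]
  congr 1
  omega

lemma pvPackPassR (m : Nat) : ∀ (bits : List Int) (out : List Char), bits.length = 6 * m →
    (List.range m).foldl (fun out k =>
      out ++ [Char.ofNat ((PySem.List.slice bits (some ((6 * k : Nat) : Int))
        (some (((6 * k : Nat) : Int) + 6))).foldl (fun v b => 2 * v + b) 0 + 63).toNat]) out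
    = out ++ pvChunks bits := by
  induction m with
  | zero =>
      intro bits out h
      have : bits = [] := List.eq_nil_of_length_eq_zero (by omega)
      subst this
      simp [pvChunks_nil]
  | succ m ih =>
      intro bits out h
      rw [List.range_succ_eq_map, List.foldl_cons, List.foldl_map]
      have hhead : PySem.List.slice bits (some ((6 * 0 : Nat) : Int))
          (some (((6 * 0 : Nat) : Int) + 6)) = bits.take 6 := by
        rw [pvSlice6]; simp
      rw [hhead]
      have hlen6 : (bits.take 6).length = 6 := by simp [List.length_take]; omega
      have hbody : ∀ (out0 : List Char) (k : Nat), k ∈ List.range m →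
          out0 ++ [Char.ofNat ((PySem.List.slice bits (some ((6 * Nat.succ k : Nat) : Int))
            (some (((6 * Nat.succ k : Nat) : Int) + 6))).foldl (fun v b => 2 * v + b) 0 + 63).toNat]
          = out0 ++ [Char.ofNat ((PySem.List.slice (bits.drop 6) (some ((6 * k : Nat) : Int))
            (some (((6 * k : Nat) : Int) + 6))).foldl (fun v b => 2 * v + b) 0 + 63).toNat] := by
        intro out0 k _
        rw [pvSlice6, pvSlice6, List.drop_drop,
          show 6 * Nat.succ k = 6 + 6 * k by omega]
      rw [PySem.List.foldl_congr_mem _ _ _ _ (fun acc k hk => hbody acc k hk)]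
      refine (ih (bits.drop 6)
        (out ++ [Char.ofNat ((bits.take 6).foldl (fun v b => 2 * v + b) 0 + 63).toNat])
        (by simp [List.length_drop]; omega)).trans ?_
      conv_rhs => rw [show bits = bits.take 6 ++ bits.drop 6 by simp,
        pvChunks_cons6 _ _ hlen6]
      simp [pvPack]

lemma pvPackPass (m : Nat) (bits : List Int) (out : List Char) (h : bits.length = 6 * m) :
    (PySem.List.pyRange 0 (bits.length : Int) 6).foldl (fun out t =>
      out ++ [Char.ofNat ((PySem.List.slice bits (some t) (some (t + 6))).foldl
        (fun v b => 2 * v + b) 0 + 63).toNat]) out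
    = out ++ pvChunks bits := by
  have hr : PySem.List.pyRange 0 (bits.length : Int) 6
      = (List.range m).map (fun k : Nat => ((6 * k : Nat) : Int)) := by
    rw [PySem.List.pyRange_of_pos _ _ (by norm_num)]
    by_cases hm : m = 0
    · subst hm
      have : bits.length = 0 := by omega
      rw [this]
      norm_num
    · have hl : ((bits.length : Nat) : Int) = 6 * (m : Int) := by rw [h]; push_cast; ring
      rw [hl, if_pos (by positivity),
        show ((6 * (m : Int) - 0 + 6 - 1) / 6).toNat = m by omega]
      apply List.map_congr_left
      intro k _
      push_cast
      ring
  rw [hr, List.foldl_map]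
  exact pvPackPassR m bits out h

lemma pvMod6 (l : List Int) : (pvPadWhile 6 l).length = 6 * ((pvPadWhile 6 l).length / 6) := by
  rw [pvPadWhile_closed]
  simp [List.length_append, List.length_replicate]
  omega

-- B's nested streaming loop equals folding pvStep over pvBits
lemma pvStreamNested (adj : List (List Int)) (init : List Char × Int × Int) :
    (PySem.List.pyRange 1 (adj.length : Int) 1).foldl (fun st j =>
      (PySem.List.pyRange 0 j 1).foldl (fun (st : List Char × Int × Int) i =>
        if st.2.2 + 1 = 6 then
          (st.1 ++ [Char.ofNat (2 * st.2.1 + (if (PySem.List.pyGetD adj j []).contains i then (1 : Int) else 0) + 63).toNat], (0 : Int), (0 : Int))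
        else (st.1, 2 * st.2.1 + (if (PySem.List.pyGetD adj j []).contains i then (1 : Int) else 0), st.2.2 + 1)) st) init
    = (pvBits adj).foldl pvStep init := by
  unfold pvBits
  rw [pvFoldl_flatMap pvStep]
  congr 1
  funext st j
  rw [List.foldl_map]
  rfl

-- ===== VERDICT (by name: the statement is the Claim_ definition above) =====
theorem encode_graph6_small_spec : Claim_equal_encode_graph6_small := by
  intro adj _
  unfold Spec_encode_graph6_small
  simp only [encode_graph6_small, encode_graph6_small_alt]
  by_cases h : (adj.length : Int) ≥ 63
  · simp [h]
  · simp only [h, if_false]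
    rw [pvBitsA, pvStreamNested]
    have hp0 : pvPack ([] : List Int) = 0 := rfl
    have hs := pvStream (pvBits adj) [] [Char.ofNat ((adj.length : Int) + 63).toNat] (by simp)
    simp only [hp0, List.length_nil, Int.natCast_zero, List.nil_append] at hs
    have hp := pvPackPass ((pvPadWhile 6 (pvBits adj)).length / 6) (pvPadWhile 6 (pvBits adj))
      [Char.ofNat ((adj.length : Int) + 63).toNat] (pvMod6 (pvBits adj))
    rw [hp, ← hs]
    rfl
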